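-- pv_equiv track=rewrite | github.com/dkmvfabio/esercizi_python | es1Verifica.py | match_piu_combattuto
-- ===== SOURCE A (Python) =====
-- def match_piu_combattuto(tupla_partite):
--     match_piu_combattuti = []
--     max = 0
--
--     for giocatore1, giocatore2, set1, set2 in tupla_partite:
--         somma = set1 + set2
--         if (somma > max):
--             max = somma
--
--     for giocatore1, giocatore2, set1, set2 in tupla_partite:
--         somma = set1 + set2
--         if (max == somma):
--             match_piu_combattuti.append(giocatore1)
--             match_piu_combattuti.append(giocatore2)
--             match_piu_combattuti.append(set1)
--             match_piu_combattuti.append(set2)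
--     return f"Il/I match più combattito/i sono: {match_piu_combattuti}, con un punteggio massimo di {max}"
-- ===== SOURCE B (Python) =====
-- def match_piu_combattuto(tupla_partite):
--     max = 0
--     match_piu_combattuti = []
--     for giocatore1, giocatore2, set1, set2 in tupla_partite:
--         somma = set1 + set2
--         if somma > max:
--             max = somma
--             match_piu_combattuti = [giocatore1, giocatore2, set1, set2]
--         elif somma == max:
--             match_piu_combattuti += [giocatore1, giocatore2, set1, set2]
--     return f"Il/I match più combattito/i sono: {match_piu_combattuti}, con un punteggio massimo di {max}"
-- ===== Notes on version B (the rewrite author's own statement) =====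
-- stated objective: simpler
-- what changed: A makes two passes over the matches (first to find the maximal set-sum, then to collect the matching quadruples); B makes a single pass that tracks the running maximum and resets the collected list whenever a strictly larger sum appears.
import Mathlib
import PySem

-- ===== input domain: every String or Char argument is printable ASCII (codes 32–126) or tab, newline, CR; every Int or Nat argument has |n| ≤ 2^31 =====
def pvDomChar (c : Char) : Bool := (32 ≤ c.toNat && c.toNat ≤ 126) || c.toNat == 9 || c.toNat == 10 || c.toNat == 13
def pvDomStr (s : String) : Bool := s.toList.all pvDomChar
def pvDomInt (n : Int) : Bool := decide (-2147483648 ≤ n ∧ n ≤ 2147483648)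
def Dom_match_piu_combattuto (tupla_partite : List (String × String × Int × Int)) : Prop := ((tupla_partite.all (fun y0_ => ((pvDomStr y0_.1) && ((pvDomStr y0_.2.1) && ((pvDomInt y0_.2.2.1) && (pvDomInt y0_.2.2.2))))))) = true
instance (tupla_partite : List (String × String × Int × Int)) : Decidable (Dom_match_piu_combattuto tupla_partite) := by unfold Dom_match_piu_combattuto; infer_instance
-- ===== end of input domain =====

-- B replaces A's two passes (max, then collect) by one pass that resets the collection on a
-- strictly larger set-sum; objective: simpler (one traversal instead of two).

-- ===== PORT A =====
-- Formatting helpers shared by both ports: the f-string's `{match_piu_combattuti}` renders the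
-- Python list repr (strings with Python's quote choice and escaping, ints via str); exact on the
-- printable-ASCII + tab/newline/CR domain.
def pyReprStrChars (q : Char) (cs : List Char) : List Char :=
  cs.flatMap (fun c =>
    if c = '\\' then ['\\', '\\']
    else if c = q then ['\\', q]
    else if c = '\t' then ['\\', 't']
    else if c = '\n' then ['\\', 'n']
    else if c = '\r' then ['\\', 'r']
    else [c])

def pyReprStr (s : String) : String :=
  let cs := s.toList
  let q := if cs.contains '\'' && !(cs.contains '"') then '"' else '\''
  String.ofList ((q :: pyReprStrChars q cs) ++ [q])

def pyReprElem : Sum String Int → String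
  | .inl s => pyReprStr s
  | .inr n => PySem.Int.toStr n

def pyReprList (l : List (Sum String Int)) : String :=
  "[" ++ String.intercalate ", " (l.map pyReprElem) ++ "]"

-- literal port of A: first loop computes max, second loop collects the quadruples
def match_piu_combattuto (tupla_partite : List (String × String × Int × Int)) : String :=
  let max : Int := tupla_partite.foldl
    (fun max t => if t.2.2.1 + t.2.2.2 > max then t.2.2.1 + t.2.2.2 else max) 0
  let match_piu_combattuti : List (Sum String Int) := tupla_partite.foldl
    (fun acc t => if max = t.2.2.1 + t.2.2.2 then
        acc ++ [Sum.inl t.1, Sum.inl t.2.1, Sum.inr t.2.2.1, Sum.inr t.2.2.2]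
      else acc) []
  "Il/I match più combattito/i sono: " ++ pyReprList match_piu_combattuti ++
    ", con un punteggio massimo di " ++ PySem.Int.toStr max

-- ===== PORT B =====
-- literal port of B: one pass maintaining (max, collected list), resetting on a new maximum
def match_piu_combattuto_alt (tupla_partite : List (String × String × Int × Int)) : String :=
  let st : Int × List (Sum String Int) := tupla_partite.foldl
    (fun st t =>
      let somma := t.2.2.1 + t.2.2.2
      if somma > st.1 then
        (somma, [Sum.inl t.1, Sum.inl t.2.1, Sum.inr t.2.2.1, Sum.inr t.2.2.2])
      else if somma = st.1 then
        (st.1, st.2 ++ [Sum.inl t.1, Sum.inl t.2.1, Sum.inr t.2.2.1, Sum.inr t.2.2.2])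
      else st) (0, [])
  "Il/I match più combattito/i sono: " ++ pyReprList st.2 ++
    ", con un punteggio massimo di " ++ PySem.Int.toStr st.1

-- ===== PRECONDITION & SPEC =====
def Spec_match_piu_combattuto (tupla_partite : List (String × String × Int × Int)) (out : String) : Prop := out = match_piu_combattuto_alt tupla_partite
instance (tupla_partite : List (String × String × Int × Int)) (out : String) : Decidable (Spec_match_piu_combattuto tupla_partite out) := by unfold Spec_match_piu_combattuto; infer_instance

-- ===== CLAIM (what is proved, stated in full; the proofs are below) =====
def Claim_equal_match_piu_combattuto : Prop := ∀ (tupla_partite : List (String × String × Int × Int)), Dom_match_piu_combattuto tupla_partite → Spec_match_piu_combattuto tupla_partite (match_piu_combattuto tupla_partite)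

-- ===== LEMMAS AND PROOFS =====
def pvSum (t : String × String × Int × Int) : Int := t.2.2.1 + t.2.2.2
def pvQuad (t : String × String × Int × Int) : List (Sum String Int) :=
  [Sum.inl t.1, Sum.inl t.2.1, Sum.inr t.2.2.1, Sum.inr t.2.2.2]
def pvMax (ts : List (String × String × Int × Int)) : Int :=
  ts.foldl (fun m t => if pvSum t > m then pvSum t else m) 0
def pvColl (m : Int) (ts : List (String × String × Int × Int)) : List (Sum String Int) :=
  ts.flatMap (fun t => if m = pvSum t then pvQuad t else [])

lemma pvColl_foldl (m : Int) (ts : List (String × String × Int × Int))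
    (acc : List (Sum String Int)) :
    ts.foldl (fun acc t => if m = pvSum t then acc ++ pvQuad t else acc) acc
      = acc ++ pvColl m ts := by
  induction ts generalizing acc with
  | nil => simp [pvColl]
  | cons x xs ih =>
    rw [List.foldl_cons, ih]
    simp only [pvColl, List.flatMap_cons]
    split_ifs <;> simp

lemma pvMax_le_aux (ts : List (String × String × Int × Int)) (a : Int) :
    a ≤ ts.foldl (fun m t => if pvSum t > m then pvSum t else m) a ∧
    ∀ t ∈ ts, pvSum t ≤ ts.foldl (fun m t => if pvSum t > m then pvSum t else m) a := by
  induction ts generalizing a with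
  | nil => simp
  | cons x xs ih =>
    simp only [List.foldl_cons, List.mem_cons]
    constructor
    · refine le_trans ?_ (ih _).1
      split_ifs with h <;> omega
    · rintro t (rfl | ht)
      · refine le_trans ?_ (ih _).1
        split_ifs with h <;> omega
      · exact (ih _).2 t ht

lemma pvSum_le_pvMax (ts : List (String × String × Int × Int)) :
    ∀ t ∈ ts, pvSum t ≤ pvMax ts := (pvMax_le_aux ts 0).2

lemma pvMax_append (ts : List (String × String × Int × Int)) (x : String × String × Int × Int) :
    pvMax (ts ++ [x]) = if pvSum x > pvMax ts then pvSum x else pvMax ts := by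
  simp [pvMax, List.foldl_append]

lemma pvColl_append (m : Int) (ts : List (String × String × Int × Int))
    (x : String × String × Int × Int) :
    pvColl m (ts ++ [x]) = pvColl m ts ++ (if m = pvSum x then pvQuad x else []) := by
  simp [pvColl]

lemma pvColl_eq_nil_of_gt (m : Int) (ts : List (String × String × Int × Int))
    (h : ∀ t ∈ ts, pvSum t < m) : pvColl m ts = [] := by
  simp only [pvColl, List.flatMap_eq_nil_iff]
  intro t ht
  have := h t ht
  simp [show ¬ m = pvSum t by omega]

lemma pvFoldB (ts : List (String × String × Int × Int)) :
    ts.foldl (fun (st : Int × List (Sum String Int)) t =>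
      let somma := t.2.2.1 + t.2.2.2
      if somma > st.1 then
        (somma, [Sum.inl t.1, Sum.inl t.2.1, Sum.inr t.2.2.1, Sum.inr t.2.2.2])
      else if somma = st.1 then
        (st.1, st.2 ++ [Sum.inl t.1, Sum.inl t.2.1, Sum.inr t.2.2.1, Sum.inr t.2.2.2])
      else st) (0, [])
      = (pvMax ts, pvColl (pvMax ts) ts) := by
  induction ts using List.reverseRecOn with
  | nil => simp [pvMax, pvColl]
  | append_singleton ts x ih =>
    rw [List.foldl_append, List.foldl_cons, List.foldl_nil, ih, pvMax_append]
    by_cases h1 : pvSum x > pvMax ts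
    · have hnil : pvColl (pvSum x) ts = [] :=
        pvColl_eq_nil_of_gt _ _ (fun t ht => lt_of_le_of_lt (pvSum_le_pvMax ts t ht) h1)
      simp only [pvSum] at h1 hnil
      simp [h1, pvColl_append, hnil, pvQuad, pvSum]
    · by_cases h2 : pvSum x = pvMax ts
      · simp only [pvSum] at h1 h2
        simp [h2, pvColl_append, pvQuad, pvSum]
      · simp only [pvSum] at h1 h2
        simp [show ¬ pvMax ts < x.2.2.1 + x.2.2.2 from h1, pvColl_append, pvSum, Ne.symm h2]
        exact h2

-- ===== VERDICT (by name: the statement is the Claim_ definition above) =====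
theorem match_piu_combattuto_spec : Claim_equal_match_piu_combattuto := by
  intro ts _
  unfold Spec_match_piu_combattuto match_piu_combattuto match_piu_combattuto_alt
  have hm : ts.foldl (fun max t => if t.2.2.1 + t.2.2.2 > max then t.2.2.1 + t.2.2.2 else max) 0
      = pvMax ts := rfl
  have hc : ts.foldl (fun acc t => if pvMax ts = t.2.2.1 + t.2.2.2 then
        acc ++ [Sum.inl t.1, Sum.inl t.2.1, Sum.inr t.2.2.1, Sum.inr t.2.2.2]
      else acc) [] = pvColl (pvMax ts) ts := by
    simpa [pvSum, pvQuad] using pvColl_foldl (pvMax ts) ts []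
  simp only [pvFoldB, hm, hc]
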